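-- pv_equiv track=rewrite | github.com/johaneitor/paste12 | tools/fix_blocks_and_json_helper.py | toggle_triple_quote
-- ===== SOURCE A (Python) =====
-- def toggle_triple_quote(line, triple):
--     # Detección simple: cuenta apariciones no escapadas del mismo delimitador
--     for q in ('"""',"'''"):
--         cnt = 0
--         j = 0
--         while True:
--             k = line.find(q, j)
--             if k < 0: break
--             # ignorar \"\"\" o \''' (escapadas)
--             if k == 0 or line[k-1] != '\\':
--                 cnt += 1
--             j = k + len(q)
--         if cnt % 2 == 1:  # impar -> alterna
--             if triple is None:
--                 triple = q
--             elif triple == q: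
--                 triple = None
--     return triple
-- ===== SOURCE B (Python) =====
-- def toggle_triple_quote(line, triple):
--     # One left-to-right scan counting unescaped, non-overlapping occurrences of
--     # both delimiters at once, then the same parity toggle per delimiter.
--     dq = sq = 0
--     i, n = 0, len(line)
--     while i < n:
--         c = line[i]
--         if (c == '"' or c == "'") and line[i:i + 3] == c * 3:
--             if i == 0 or line[i - 1] != '\\':
--                 if c == '"':
--                     dq += 1
--                 else:
--                     sq += 1
--             i += 3
--         else:
--             i += 1
--     for q, cnt in (('"""', dq), ("'''", sq)):
--         if cnt % 2 == 1:
--             if triple is None: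
--                 triple = q
--             elif triple == q:
--                 triple = None
--     return triple
-- ===== Notes on version B (the rewrite author's own statement) =====
-- stated objective: alternative
-- what changed: Replaces A's two independent find-based passes (one per delimiter) with a single left-to-right index scan that counts non-overlapping unescaped occurrences of both delimiters in one pass, then applies the same parity toggles.
import Mathlib
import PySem

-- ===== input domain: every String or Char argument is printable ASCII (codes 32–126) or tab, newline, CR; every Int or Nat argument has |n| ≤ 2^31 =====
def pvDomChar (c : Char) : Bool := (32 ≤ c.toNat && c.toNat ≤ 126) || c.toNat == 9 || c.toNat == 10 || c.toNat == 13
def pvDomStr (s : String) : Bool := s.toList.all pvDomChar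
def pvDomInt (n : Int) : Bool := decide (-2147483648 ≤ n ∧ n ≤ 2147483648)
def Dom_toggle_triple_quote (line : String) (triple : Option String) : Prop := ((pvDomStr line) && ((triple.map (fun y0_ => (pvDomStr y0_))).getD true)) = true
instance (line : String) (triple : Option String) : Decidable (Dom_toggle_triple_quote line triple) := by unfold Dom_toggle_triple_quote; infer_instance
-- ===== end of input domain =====

-- B replaces A's two find-based passes by one left-to-right scan counting both
-- delimiters at once; same parity toggles afterwards (objective: alternative).

-- ===== PORT A =====
-- shared tail of both Pythons: 'if cnt % 2 == 1: toggle triple for q'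
def pvToggleStep (q : String) (cnt : Int) (triple : Option String) : Option String :=
  if PySem.Int.mod cnt 2 == 1 then
    match triple with
    | none => some q
    | some t => if t = q then none else triple
  else triple

-- A's inner 'while True' find loop; fuel (= len+1) only makes it total, it never runs out
def tqFindLoop (line : String) (q : String) : Nat → Int → Int → Int
  | 0, _, cnt => cnt
  | fuel + 1, j, cnt =>
    let k := PySem.Str.findFrom line q j
    if k < 0 then cnt
    else
      let cnt' := if k = 0 ∨ PySem.Str.pyGet? line (k - 1) ≠ some '\\' then cnt + 1 else cnt
      tqFindLoop line q fuel (k + PySem.Str.len q) cnt'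

def toggle_triple_quote (line : String) (triple : Option String) : Option String :=
  let t1 := pvToggleStep "\"\"\"" (tqFindLoop line "\"\"\"" (PySem.Str.len line + 1).toNat 0 0) triple
  pvToggleStep "'''" (tqFindLoop line "'''" (PySem.Str.len line + 1).toNat 0 0) t1

-- ===== PORT B =====
-- B's single scan: prev = character before the current position, advance 3 on a
-- delimiter match (counting it only when unescaped), else advance 1
def tqScanB (prev : Option Char) : List Char → Int × Int
  | [] => (0, 0)
  | c :: cs =>
    if (c = '"' ∨ c = '\'') ∧ cs.take 2 = [c, c] then
      let r := tqScanB (some c) (cs.drop 2)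
      if prev = some '\\' then r
      else if c = '"' then (r.1 + 1, r.2) else (r.1, r.2 + 1)
    else
      tqScanB (some c) cs
termination_by cs => cs.length
decreasing_by all_goals (simp only [List.length_drop, List.length_cons]; omega)

def toggle_triple_quote_alt (line : String) (triple : Option String) : Option String :=
  let r := tqScanB none line.toList
  let t1 := pvToggleStep "\"\"\"" r.1 triple
  pvToggleStep "'''" r.2 t1

-- ===== PRECONDITION & SPEC =====
def Spec_toggle_triple_quote (line : String) (triple : Option String) (out : Option String) : Prop := out = toggle_triple_quote_alt line triple
instance (line : String) (triple : Option String) (out : Option String) : Decidable (Spec_toggle_triple_quote line triple out) := by unfold Spec_toggle_triple_quote; infer_instance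

-- ===== CLAIM (what is proved, stated in full; the proofs are below) =====
def Claim_equal_toggle_triple_quote : Prop := ∀ (line : String) (triple : Option String), Dom_toggle_triple_quote line triple → Spec_toggle_triple_quote line triple (toggle_triple_quote line triple)

-- ===== LEMMAS AND PROOFS =====

-- reference count: unescaped non-overlapping occurrences of [a,a,a], prev = char before
def cnt3 (a : Char) (prev : Option Char) : List Char → Int
  | [] => 0
  | c :: cs =>
    if c = a ∧ cs.take 2 = [a, a] then
      (if prev = some '\\' then 0 else 1) + cnt3 a (some c) (cs.drop 2)
    else
      cnt3 a (some c) cs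
termination_by cs => cs.length
decreasing_by all_goals (simp only [List.length_drop, List.length_cons]; omega)

def prevOf (cs : List Char) (j : Nat) : Option Char := if j = 0 then none else cs[j - 1]?

theorem cnt3_match_iff (a c : Char) (cs : List Char) :
    (c = a ∧ cs.take 2 = [a, a]) ↔ [a, a, a] <+: c :: cs := by
  constructor
  · rintro ⟨rfl, h2⟩
    match cs, h2 with
    | x :: y :: t, h2 =>
      simp at h2
      simp [h2, List.prefix_iff_eq_take]
  · intro h
    obtain ⟨t, ht⟩ := h
    simp only [List.cons_append, List.nil_append, List.cons.injEq] at ht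
    obtain ⟨rfl, ht2⟩ := ht
    rw [← ht2]
    exact ⟨rfl, rfl⟩

theorem cnt3_zero (a : Char) : ∀ (cs : List Char) (prev : Option Char),
    ¬ ([a, a, a] <:+: cs) → cnt3 a prev cs = 0 := by
  intro cs
  induction cs with
  | nil => intro prev h; simp [cnt3]
  | cons c cs ih =>
    intro prev h
    rw [cnt3]
    rw [if_neg]
    · exact ih _ (fun hinf => h (hinf.trans (List.suffix_cons c cs).isInfix))
    · intro hc
      exact h ((cnt3_match_iff a c cs).1 hc).isInfix

theorem cnt3_skip (a : Char) : ∀ (m : Nat) (rest : List Char) (prev : Option Char),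
    (∀ i, i < m → ¬ ([a, a, a] <+: rest.drop i)) →
    cnt3 a prev rest = cnt3 a (if m = 0 then prev else rest[m - 1]?) (rest.drop m) := by
  intro m
  induction m with
  | zero => intro rest prev _; simp
  | succ m ih =>
    intro rest prev h
    cases rest with
    | nil => simp [cnt3]
    | cons c t =>
      rw [cnt3, if_neg]
      · have hrec := ih t (some c) (fun i hi => by
          have := h (i + 1) (by omega)
          simpa using this)
        rw [hrec]
        have hdrop : (c :: t).drop (m + 1) = t.drop m := rfl
        rw [hdrop]
        congr 1
        cases m with
        | zero => simp
        | succ m' => simp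
      · intro hc
        exact h 0 (by omega) (by simpa using (cnt3_match_iff a c t).1 hc)

-- the char before position jn+m as an absolute position
theorem prevOf_shift (cs : List Char) (jn m : Nat) (h : m ≠ 0) :
    (cs.drop jn)[m - 1]? = cs[jn + m - 1]? := by
  rw [List.getElem?_drop]
  congr 1
  omega

-- A's find loop computes cnt + cnt3 from position jn
theorem tqFindLoop_eq (line q : String) (a : Char) (hq : q.toList = [a, a, a]) :
    ∀ (fuel jn : Nat) (cnt : Int), jn ≤ line.toList.length → line.toList.length + 1 - jn ≤ fuel →
    tqFindLoop line q fuel (jn : Int) cnt = cnt + cnt3 a (prevOf line.toList jn) (line.toList.drop jn) := by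
  intro fuel
  induction fuel with
  | zero => intro jn cnt h hf; omega
  | succ fuel ih =>
    intro jn cnt hjn hf
    rw [tqFindLoop]
    simp only [PySem.Str.findFrom_eq]
    simp only [PySem.Chars.findFrom_natCast line.toList q.toList jn (by simpa using hjn)]
    by_cases hfind : PySem.Chars.find (line.toList.drop jn) q.toList = -1
    · rw [if_pos hfind]
      rw [if_pos (by decide : (-1 : Int) < 0)]
      rw [cnt3_zero]
      · ring
      · rw [hq] at hfind
        exact (PySem.Chars.find_eq_neg_one_iff _ _).1 hfind
    · rw [if_neg hfind]
      have hge : 0 ≤ PySem.Chars.find (line.toList.drop jn) q.toList := by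
        have := PySem.Chars.neg_one_le_find (line.toList.drop jn) q.toList
        omega
      obtain ⟨m, hm⟩ : ∃ m : Nat, PySem.Chars.find (line.toList.drop jn) q.toList = (m : Int) :=
        ⟨(PySem.Chars.find (line.toList.drop jn) q.toList).toNat, by omega⟩
      have hspec := PySem.Chars.find_spec (s := line.toList.drop jn) (sub := q.toList) (by omega)
      rw [hm] at hspec
      simp only [Int.toNat_natCast] at hspec
      obtain ⟨hpref, hmin⟩ := hspec
      rw [List.drop_drop] at hpref
      rw [hq] at hpref hmin
      simp only [hm]
      -- the match is inside: jn + m + 3 ≤ len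
      have hlen3 : jn + m + 3 ≤ line.toList.length := by
        have hle := hpref.length_le
        simp only [List.length_drop] at hle
        have h3 : ([a, a, a] : List Char).length = 3 := rfl
        omega
      rw [if_neg (by omega : ¬ ((jn : Int) + (m : Int) < 0))]
      -- split cnt3 at the match position
      rw [cnt3_skip a m (line.toList.drop jn) (prevOf line.toList jn)
        (fun i hi => hmin i hi), List.drop_drop]
      have hprev : (if m = 0 then prevOf line.toList jn else (line.toList.drop jn)[m - 1]?)
          = prevOf line.toList (jn + m) := by
        by_cases hm0 : m = 0
        · simp [hm0]
        · rw [if_neg hm0, prevOf_shift line.toList jn m hm0]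
          unfold prevOf
          rw [if_neg (by omega)]
      rw [hprev]
      -- unfold cnt3 at the match
      obtain ⟨t, ht⟩ := hpref
      have hdrop : line.toList.drop (jn + m) = a :: a :: a :: t := by rw [← ht]; simp
      rw [hdrop, cnt3, if_pos (show a = a ∧ (a :: a :: t).take 2 = [a, a] from ⟨rfl, rfl⟩)]
      have hdt : (a :: a :: t).drop 2 = t := rfl
      rw [hdt]
      -- cnt increment condition matches the escape test
      have hcond : (((jn : Int) + (m : Int) = 0 ∨ PySem.Str.pyGet? line ((jn : Int) + (m : Int) - 1) ≠ some '\\'))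
          ↔ (¬ (prevOf line.toList (jn + m) = some '\\')) := by
        unfold prevOf
        by_cases h0 : jn + m = 0
        · have hz : (jn : Int) + (m : Int) = 0 := by omega
          exact iff_of_true (Or.inl hz) (by simp [h0])
        · rw [if_neg h0]
          have hidx : (jn : Int) + (m : Int) - 1 = ((jn + m - 1 : Nat) : Int) := by omega
          rw [hidx, PySem.Str.pyGet?_natCast]
          constructor
          · rintro (h | h)
            · exact absurd (by omega : jn + m = 0) h0
            · simpa using h
          · intro h
            right
            simpa using h
      -- recursive call via IH
      have hlenq : PySem.Str.len q = 3 := by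
        rw [PySem.Str.len_eq, hq]
        rfl
      have hjcast : (jn : Int) + (m : Int) + PySem.Str.len q = ((jn + m + 3 : Nat) : Int) := by
        rw [hlenq]; push_cast; ring
      rw [hjcast, ih (jn + m + 3) _ (by omega) (by omega)]
      have hdrop3 : line.toList.drop (jn + m + 3) = t := by
        have h1 : List.drop 3 (List.drop (jn + m) line.toList) = t := by rw [hdrop]; rfl
        rw [List.drop_drop] at h1
        convert h1 using 2
      have hprev3 : prevOf line.toList (jn + m + 3) = some a := by
        unfold prevOf
        rw [if_neg (by omega)]
        have h2 : (List.drop (jn + m) line.toList)[2]? = some a := by rw [hdrop]; rfl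
        rw [List.getElem?_drop] at h2
        convert h2 using 2
      rw [hdrop3, hprev3]
      by_cases hc : prevOf line.toList (jn + m) = some '\\'
      · have hL : ¬ ((jn : Int) + (m : Int) = 0 ∨ PySem.Str.pyGet? line ((jn : Int) + (m : Int) - 1) ≠ some '\\') := by
          rw [hcond]
          simp [hc]
        rw [if_neg hL, if_pos hc]
        ring
      · rw [if_pos (hcond.2 hc), if_neg hc]
        ring

-- B's scan computes both cnt3 counts at once
theorem tqScanB_eq : ∀ (n : Nat) (cs : List Char), cs.length ≤ n → ∀ (prev : Option Char),
    tqScanB prev cs = (cnt3 '"' prev cs, cnt3 '\'' prev cs) := by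
  intro n
  induction n with
  | zero =>
    intro cs hn prev
    match cs, hn with
    | [], _ => simp [tqScanB, cnt3]
  | succ n ih =>
    intro cs hn prev
    cases cs with
    | nil => simp [tqScanB, cnt3]
    | cons c cs =>
      rw [tqScanB]
      by_cases hm : (c = '"' ∨ c = '\'') ∧ cs.take 2 = [c, c]
      · rw [if_pos hm]
        obtain ⟨hc, htake⟩ := hm
        cases cs with
        | nil => simp at htake
        | cons x cs2 =>
        cases cs2 with
        | nil => simp at htake
        | cons y t =>
          simp only [List.take, List.cons.injEq] at htake
          obtain ⟨h1, h2, -⟩ := htake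
          rw [h1, h2]
          have hdt : (c :: c :: t).drop 2 = t := rfl
          rw [hdt, ih t (by simp at hn; omega) (some c)]
          rcases hc with rfl | rfl
          · rw [show cnt3 '"' prev ('"' :: '"' :: '"' :: t) =
                  (if prev = some '\\' then 0 else 1) + cnt3 '"' (some '"') t by
              rw [cnt3, if_pos (by simp)]; rfl]
            rw [show cnt3 '\'' prev ('"' :: '"' :: '"' :: t) = cnt3 '\'' (some '"') t by
              rw [cnt3, if_neg (by simp), cnt3, if_neg (by simp), cnt3, if_neg (by simp)]]
            by_cases hp : prev = some '\\' <;> simp [hp, Prod.ext_iff] <;> ring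
          · rw [show cnt3 '\'' prev ('\'' :: '\'' :: '\'' :: t) =
                  (if prev = some '\\' then 0 else 1) + cnt3 '\'' (some '\'') t by
              rw [cnt3, if_pos (by simp)]; rfl]
            rw [show cnt3 '"' prev ('\'' :: '\'' :: '\'' :: t) = cnt3 '"' (some '\'') t by
              rw [cnt3, if_neg (by simp), cnt3, if_neg (by simp), cnt3, if_neg (by simp)]]
            by_cases hp : prev = some '\\' <;> simp [hp, Prod.ext_iff] <;> ring
      · rw [if_neg hm, ih cs (by simp at hn; omega) (some c)]
        have h1 : cnt3 '"' prev (c :: cs) = cnt3 '"' (some c) cs := by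
          rw [cnt3, if_neg (fun ⟨h1, h2⟩ => hm ⟨Or.inl h1, by rw [h1]; exact h2⟩)]
        have h2 : cnt3 '\'' prev (c :: cs) = cnt3 '\'' (some c) cs := by
          rw [cnt3, if_neg (fun ⟨h1, h2⟩ => hm ⟨Or.inr h1, by rw [h1]; exact h2⟩)]
        rw [h1, h2]

theorem tqScanB_spec (prev : Option Char) (cs : List Char) :
    tqScanB prev cs = (cnt3 '"' prev cs, cnt3 '\'' prev cs) :=
  tqScanB_eq cs.length cs le_rfl prev

-- ===== VERDICT (by name: the statement is the Claim_ definition above) =====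
theorem toggle_triple_quote_spec : Claim_equal_toggle_triple_quote := by
  intro line triple _
  unfold Spec_toggle_triple_quote toggle_triple_quote toggle_triple_quote_alt
  have hlen : (PySem.Str.len line + 1).toNat = line.toList.length + 1 := by
    rw [PySem.Str.len_eq]
    simp
  have hA1 := tqFindLoop_eq line "\"\"\"" '"' rfl (line.toList.length + 1) 0 0 (by omega) (by omega)
  have hA2 := tqFindLoop_eq line "'''" '\'' rfl (line.toList.length + 1) 0 0 (by omega) (by omega)
  simp only [Nat.cast_zero, zero_add, List.drop_zero] at hA1 hA2
  rw [show prevOf line.toList 0 = none from rfl] at hA1 hA2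
  simp only [hlen, hA1, hA2, tqScanB_spec]
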